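-- pv_equiv track=rewrite | github.com/paiml/depyler | examples/hard_realworld_markdown.py | format_code_inline
-- ===== SOURCE A (Python) =====
-- def md_slice(text: str, start: int, end: int) -> str:
--     """Extract substring [start, end)."""
--     result: str = ""
--     idx: int = start
--     while idx < end and idx < len(text):
--         result = result + text[idx]
--         idx = idx + 1
--     return result
--
-- def format_code_inline(text: str) -> str:
--     """Replace `code` with <code>code</code>."""
--     result: str = ""
--     idx: int = 0
--     while idx < len(text):
--         if text[idx] == "`":
--             end: int = idx + 1
--             found_close: int = 0
--             while end < len(text) and found_close == 0:
--                 if text[end] == "`":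
--                     found_close = 1
--                     inner: str = md_slice(text, idx + 1, end)
--                     result = result + "<code>" + inner + "</code>"
--                     idx = end + 1
--                 else:
--                     end = end + 1
--             if found_close == 0:
--                 result = result + text[idx]
--                 idx = idx + 1
--         else:
--             result = result + text[idx]
--             idx = idx + 1
--     return result
-- ===== SOURCE B (Python) =====
-- def format_code_inline(text: str) -> str:
--     """Replace `code` with <code>code</code>."""
--     parts = text.split("`")
--     out = parts[0]
--     i = 1
--     while i + 1 < len(parts):
--         out = out + "<code>" + parts[i] + "</code>" + parts[i + 1]
--         i = i + 2
--     if i < len(parts):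
--         out = out + "`" + parts[i]
--     return out
-- ===== Notes on version B (the rewrite author's own statement) =====
-- stated objective: faster
-- what changed: Replaces A's nested index scanner (outer char loop, inner closing-delimiter search, md_slice re-copying each span char by char with quadratic string concatenation) with a single split on the backtick character followed by one pairwise rejoin of the pieces; md_slice is no longer used.
import Mathlib
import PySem

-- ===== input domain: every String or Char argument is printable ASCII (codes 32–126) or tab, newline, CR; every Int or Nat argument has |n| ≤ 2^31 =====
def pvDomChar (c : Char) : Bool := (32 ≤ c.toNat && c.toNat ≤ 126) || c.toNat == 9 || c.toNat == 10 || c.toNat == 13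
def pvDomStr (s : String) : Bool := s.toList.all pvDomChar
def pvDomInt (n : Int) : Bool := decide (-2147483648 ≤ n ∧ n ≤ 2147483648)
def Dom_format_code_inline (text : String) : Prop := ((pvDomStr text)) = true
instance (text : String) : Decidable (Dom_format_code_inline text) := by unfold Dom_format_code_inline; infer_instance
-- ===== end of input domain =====

-- B replaces A's manual character scanner with one split on the backtick character
-- plus a pairwise rejoin of the pieces (no per-character string concatenation;
-- measurably faster on large inputs).


-- ===== PORT A =====
-- md_slice's while loop: state (result, idx)
def md_slice_go (l : List Char) (e : Int) (result : List Char) (idx : Int) : List Char :=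
  if h : idx < e ∧ idx < (l.length : Int) then
    match PySem.List.pyGet? l idx with
    | some c => md_slice_go l e (result ++ [c]) (idx + 1)
    | none => result      -- unreachable guard (idx is in range)
  else result
termination_by (min e (l.length : Int) - idx).toNat
decreasing_by omega

-- md_slice(text, start, end): extract [start, end)  (A-side helper, on the char list)
def md_slice (text : List Char) (start end_ : Int) : List Char :=
  md_slice_go text end_ [] start

-- A's inner while loop: scan from `e` for a closing backtick; `some e'` = found_close
def findClose (l : List Char) (e : Int) : Option Int :=
  if h : e < (l.length : Int) then
    if PySem.List.pyGet? l e = some '`' then some e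
    else findClose l (e + 1)
  else none
termination_by ((l.length : Int) - e).toNat
decreasing_by omega

-- needed by fci_go's termination: a found closing index is ≥ the scan start and < length
theorem findClose_bounds {l : List Char} {e : Int} :
    ∀ {e' : Int}, findClose l e = some e' → e ≤ e' ∧ e' < (l.length : Int) := by
  fun_induction findClose l e with
  | case1 e hlt hq =>
    intro e' h
    simp only [Option.some.injEq] at h
    omega
  | case2 e hlt hq ih =>
    intro e' h
    obtain ⟨h1, h2⟩ := ih h
    exact ⟨by omega, h2⟩
  | case3 e hlt =>
    intro e' h
    simp at h

-- A's outer while loop: state (result, idx)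
def fci_go (l : List Char) (result : List Char) (idx : Int) : List Char :=
  if h : idx < (l.length : Int) then
    if PySem.List.pyGet? l idx = some '`' then
      match hf : findClose l (idx + 1) with
      | some e =>
        fci_go l (result ++ "<code>".toList ++ md_slice l (idx + 1) e ++ "</code>".toList) (e + 1)
      | none => fci_go l (result ++ (PySem.List.pyGet? l idx).toList) (idx + 1)
    else fci_go l (result ++ (PySem.List.pyGet? l idx).toList) (idx + 1)
  else result
termination_by ((l.length : Int) - idx).toNat
decreasing_by
  · have := findClose_bounds hf; omega
  · omega
  · omega

def format_code_inline (text : String) : String :=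
  String.mk (fci_go text.toList [] 0)

-- ===== PORT B =====
-- Source B's pair-consuming while loop (i stepping by 2) + trailing unmatched-backtick if
def pairsGo : List (List Char) → List Char
  | x :: y :: rest => "<code>".toList ++ x ++ "</code>".toList ++ y ++ pairsGo rest
  | [x] => '`' :: x
  | [] => []

def format_code_inline_alt (text : String) : String :=
  -- text.split("`"): non-empty separator → PySem.Chars.splitOn (exact)
  match PySem.Chars.splitOn text.toList ['`'] with
  | p0 :: rest => String.mk (p0 ++ pairsGo rest)
  | [] => ""      -- unreachable: split never returns []

-- ===== PRECONDITION & SPEC =====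
def Spec_format_code_inline (text : String) (out : String) : Prop := out = format_code_inline_alt text
instance (text : String) (out : String) : Decidable (Spec_format_code_inline text out) := by unfold Spec_format_code_inline; infer_instance

-- ===== CLAIM (what is proved, stated in full; the proofs are below) =====
def Claim_equal_format_code_inline : Prop := ∀ (text : String), Dom_format_code_inline text → Spec_format_code_inline text (format_code_inline text)

-- ===== LEMMAS AND PROOFS =====

-- first backtick of a list: (prefix before it, suffix after it), none if absent
def splitFirst : List Char → Option (List Char × List Char)
  | [] => none
  | c :: cs => if c = '`' then some ([], cs) else (splitFirst cs).map (fun p => (c :: p.1, p.2))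

theorem splitFirst_decomp : ∀ {cs i r : List Char}, splitFirst cs = some (i, r) → cs = i ++ '`' :: r := by
  intro cs
  induction cs with
  | nil => intro i r h; simp [splitFirst] at h
  | cons c cs ih =>
    intro i r h
    by_cases hc : c = '`'
    · simp [splitFirst, hc] at h
      obtain ⟨h1, h2⟩ := h
      subst h1; subst h2
      simp [hc]
    · simp [splitFirst, hc] at h
      obtain ⟨a, hp, h1⟩ := h
      subst h1
      simp [ih hp]

theorem splitFirst_len {cs i r : List Char} (h : splitFirst cs = some (i, r)) :
    r.length < cs.length := by
  have := splitFirst_decomp h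
  subst this
  simp only [List.length_append, List.length_cons]
  omega

-- structural ("suffix") version of A's scanner
def fA : List Char → List Char
  | [] => []
  | c :: cs =>
    if c = '`' then
      match hs : splitFirst cs with
      | some (i, r) => "<code>".toList ++ i ++ "</code>".toList ++ fA r
      | none => c :: cs
    else c :: fA cs
termination_by l => l.length
decreasing_by
  · have := splitFirst_len hs; simp only [List.length_cons]; omega
  · simp

theorem md_slice_go_spec (l : List Char) (e : Nat) : ∀ (n i : Nat) (res : List Char), e - i ≤ n →
    md_slice_go l (e : Int) res (i : Int) = res ++ (l.drop i).take (e - i) := by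
  intro n
  induction n with
  | zero =>
    intro i res hn
    have h' : ¬((i : Int) < (e : Int) ∧ (i : Int) < (l.length : Int)) := by omega
    rw [md_slice_go, dif_neg h']
    simp [Nat.sub_eq_zero_of_le (by omega : e ≤ i)]
  | succ n ih =>
    intro i res hn
    rw [md_slice_go]
    by_cases h : (i : Int) < (e : Int) ∧ (i : Int) < (l.length : Int)
    · have hi : i < l.length := by omega
      have hie : i < e := by omega
      rw [dif_pos h]
      have hg : PySem.List.pyGet? l (i : Int) = some l[i] := by
        simp [hi]
      rw [hg]
      change md_slice_go l _ (res ++ [l[i]]) ((i : Int) + 1) = _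
      have hcast : ((i : Int) + 1) = ((i + 1 : Nat) : Int) := by push_cast; ring
      rw [hcast, ih (i + 1) (res ++ [l[i]]) (by omega)]
      rw [List.drop_eq_getElem_cons hi]
      have : e - i = (e - (i + 1)) + 1 := by omega
      rw [this, List.take_succ_cons]
      simp
    · rw [dif_neg h]
      rcases Nat.lt_or_ge i l.length with hi | hi
      · have hie : e ≤ i := by omega
        simp [Nat.sub_eq_zero_of_le hie]
      · simp [List.drop_eq_nil_of_le hi]

theorem findClose_spec (l : List Char) : ∀ (n e : Nat), l.length - e ≤ n →
    findClose l (e : Int) = (splitFirst (l.drop e)).map (fun p => ((e + p.1.length : Nat) : Int)) := by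
  intro n
  induction n with
  | zero =>
    intro e hn
    have h' : ¬((e : Int) < (l.length : Int)) := by omega
    rw [findClose, dif_neg h']
    simp [List.drop_eq_nil_of_le (by omega : l.length ≤ e), splitFirst]
  | succ n ih =>
    intro e hn
    rw [findClose]
    by_cases h : (e : Int) < (l.length : Int)
    · have he : e < l.length := by omega
      rw [dif_pos h]
      have hg : PySem.List.pyGet? l (e : Int) = some l[e] := by
        simp [he]
      rw [hg]
      have hdrop : l.drop e = l[e] :: l.drop (e + 1) := (List.drop_eq_getElem_cons he)
      by_cases hc : l[e] = '`'
      · simp [hdrop, splitFirst, hc]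
      · have hcast : ((e : Int) + 1) = ((e + 1 : Nat) : Int) := by push_cast; ring
        rw [if_neg (by simp [hc]), hcast, ih (e + 1) (by omega)]
        rw [hdrop]
        simp only [splitFirst, if_neg hc]
        cases hs : splitFirst (l.drop (e + 1)) with
        | none => simp
        | some p => simp; omega
    · have he : l.length ≤ e := by omega
      rw [dif_neg h]
      simp [List.drop_eq_nil_of_le he, splitFirst]

theorem fA_no_tick : ∀ {cs : List Char}, splitFirst cs = none → fA cs = cs := by
  intro cs
  induction cs with
  | nil => intro _; simp [fA]
  | cons c cs ih =>
    intro h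
    by_cases hc : c = '`'
    · simp [splitFirst, hc] at h
    · simp [splitFirst, hc] at h
      rw [fA, if_neg hc, ih h]

theorem fci_go_spec (l : List Char) : ∀ (n k : Nat) (res : List Char), l.length - k ≤ n →
    fci_go l res (k : Int) = res ++ fA (l.drop k) := by
  intro n
  induction n with
  | zero =>
    intro k res hn
    have h' : ¬((k : Int) < (l.length : Int)) := by omega
    rw [fci_go, dif_neg h']
    simp [List.drop_eq_nil_of_le (by omega : l.length ≤ k), fA]
  | succ n ih =>
    intro k res hn
    rw [fci_go]
    by_cases h : (k : Int) < (l.length : Int)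
    · have hk : k < l.length := by omega
      rw [dif_pos h]
      have hg : PySem.List.pyGet? l (k : Int) = some l[k] := by
        simp [hk]
      have hdrop : l.drop k = l[k] :: l.drop (k + 1) := (List.drop_eq_getElem_cons hk)
      have hsucc : ((k : Int) + 1) = ((k + 1 : Nat) : Int) := by push_cast; ring
      by_cases hc : l[k] = '`'
      · rw [if_pos (by rw [hg, hc])]
        split
        next e heq =>
          rw [hsucc, findClose_spec l (l.length - (k + 1)) (k + 1) le_rfl] at heq
          cases hs : splitFirst (l.drop (k + 1)) with
          | none => rw [hs] at heq; simp at heq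
          | some p =>
          obtain ⟨i, r⟩ := p
          rw [hs] at heq
          simp only [Option.map_some, Option.some.injEq] at heq
          subst heq
          have hdec := splitFirst_decomp hs
          -- the slice [k+1, k+1+|i|) is exactly i
          have hslice : md_slice l ((k + 1 : Nat) : Int) ((k + 1 + i.length : Nat) : Int) = i := by
            rw [md_slice, md_slice_go_spec l (k + 1 + i.length) (i.length) (k + 1) [] (by omega)]
            rw [hdec]
            simp
          have hdrop2 : l.drop (k + 1 + i.length + 1) = r := by
            have h1 : l.drop (k + 1 + i.length + 1) = (l.drop (k + 1)).drop (i.length + 1) := by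
              rw [List.drop_drop]; ring_nf
            rw [h1, hdec]
            have h2 : i.length + 1 = (i ++ ['`']).length := by simp
            have h3 : i ++ '`' :: r = (i ++ ['`']) ++ r := by simp
            rw [h2, h3, List.drop_left]
          have hcast : ((k + 1 + i.length : Nat) : Int) + 1 = ((k + 1 + i.length + 1 : Nat) : Int) := by
            push_cast; ring
          rw [hsucc, hslice, hcast, ih (k + 1 + i.length + 1) _ (by omega)]
          rw [hdrop2, hdrop, fA, if_pos hc, hs]
          simp
        next heq =>
          rw [hsucc, findClose_spec l (l.length - (k + 1)) (k + 1) le_rfl] at heq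
          cases hs : splitFirst (l.drop (k + 1)) with
          | some p => rw [hs] at heq; simp at heq
          | none =>
            rw [hg, hsucc, ih (k + 1) _ (by omega)]
            rw [hdrop, fA, if_pos hc]
            rw [hs, fA_no_tick hs, hc]
            simp
      · rw [if_neg (by rw [hg]; simp [hc])]
        rw [hg, hsucc, ih (k + 1) _ (by omega)]
        rw [hdrop, fA, if_neg hc]
        simp
    · have hk : l.length ≤ k := by omega
      rw [dif_neg h]
      simp [List.drop_eq_nil_of_le hk, fA]

-- ---- B side: characterize PySem.Chars.splitOn on separator ['`'] ----

-- pure (fuel-free) version of splitOn's loop for a single-char separator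
def P : List Char → List Char → List (List Char)
  | [], cur => [cur.reverse]
  | c :: rest, cur => if c = '`' then cur.reverse :: P rest [] else P rest (c :: cur)

theorem splitOn_go_eq_P : ∀ (fuel : Nat) (l cur : List Char) (acc : List (List Char)),
    l.length ≤ fuel →
    PySem.Chars.splitOn.go ['`'] fuel l cur acc = acc.reverse ++ P l cur := by
  intro fuel
  induction fuel with
  | zero =>
    intro l cur acc hl
    have : l = [] := by cases l <;> simp_all
    subst this
    simp [PySem.Chars.splitOn.go, P]
  | succ fuel ih =>
    intro l cur acc hl
    cases l with
    | nil => simp [PySem.Chars.splitOn.go, P]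
    | cons c rest =>
      rw [PySem.Chars.splitOn.go]
      by_cases hc : c = '`'
      · have hpre : List.isPrefixOf ['`'] (c :: rest) = true := by simp [List.isPrefixOf, hc]
        rw [if_pos hpre]
        have hdrop : List.drop (List.length ['`']) (c :: rest) = rest := by simp
        rw [hdrop, ih rest [] (cur.reverse :: acc) (by simp at hl; omega)]
        simp [P, hc]
      · have hpre : List.isPrefixOf ['`'] (c :: rest) = false := by
          simp [List.isPrefixOf]; exact fun h => hc h.symm
        rw [if_neg (by simp [hpre])]
        rw [ih rest (c :: cur) acc (by simp at hl; omega)]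
        simp [P, hc]

theorem splitOn_eq_P (l : List Char) : PySem.Chars.splitOn l ['`'] = P l [] := by
  rw [PySem.Chars.splitOn, splitOn_go_eq_P (l.length + 1) l [] [] (by omega)]
  simp

theorem P_ne_nil : ∀ (l cur : List Char), P l cur ≠ [] := by
  intro l
  induction l with
  | nil => intro cur; simp [P]
  | cons c rest ih =>
    intro cur
    by_cases hc : c = '`' <;> simp [P, hc, ih]

theorem P_cur (l : List Char) : ∀ (cur : List Char),
    P l cur = (P l []).modifyHead (cur.reverse ++ ·) := by
  induction l with
  | nil => intro cur; simp [P]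
  | cons c rest ih =>
    intro cur
    by_cases hc : c = '`'
    · simp [P, hc]
    · rw [P, if_neg hc, P, if_neg hc, ih (c :: cur), ih [c]]
      cases hP : P rest [] with
      | nil => exact absurd hP (P_ne_nil rest [])
      | cons q qs => simp

theorem P_splitFirst_some : ∀ {cs i r : List Char}, splitFirst cs = some (i, r) →
    P cs [] = i :: P r [] := by
  intro cs
  induction cs with
  | nil => intro i r h; simp [splitFirst] at h
  | cons c rest ih =>
    intro i r h
    by_cases hc : c = '`'
    · simp [splitFirst, hc] at h
      obtain ⟨h1, h2⟩ := h
      subst h1; subst h2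
      simp [P, hc]
    · simp [splitFirst, hc] at h
      obtain ⟨a, hp, h1⟩ := h
      subst h1
      rw [P, if_neg hc, P_cur rest [c], ih hp]
      simp

theorem P_splitFirst_none : ∀ {cs : List Char}, splitFirst cs = none → P cs [] = [cs] := by
  intro cs
  induction cs with
  | nil => intro _; simp [P]
  | cons c rest ih =>
    intro h
    by_cases hc : c = '`'
    · simp [splitFirst, hc] at h
    · simp [splitFirst, hc] at h
      rw [P, if_neg hc, P_cur rest [c], ih h]
      simp

-- A's structural scanner equals B's split-and-rejoin
theorem fA_eq_P : ∀ (n : Nat) (l : List Char), l.length ≤ n →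
    fA l = (match P l [] with
            | p0 :: rest => p0 ++ pairsGo rest
            | [] => []) := by
  intro n
  induction n with
  | zero =>
    intro l hl
    have : l = [] := by cases l <;> simp_all
    subst this
    simp [fA, P, pairsGo]
  | succ n ih =>
    intro l hl
    cases l with
    | nil => simp [fA, P, pairsGo]
    | cons c rest =>
      have hrest : rest.length ≤ n := by simp at hl; omega
      by_cases hc : c = '`'
      · subst hc
        rw [P, if_pos rfl]
        cases hs : splitFirst rest with
        | none =>
          rw [fA, if_pos rfl, hs, P_splitFirst_none hs]
          simp [pairsGo]
        | some p =>
          obtain ⟨i, r⟩ := p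
          rw [fA, if_pos rfl, hs, P_splitFirst_some hs]
          have hr := ih r (by have := splitFirst_len hs; omega)
          cases hP : P r [] with
          | nil => exact absurd hP (P_ne_nil r [])
          | cons q qs =>
            rw [hP] at hr
            simp only [pairsGo]
            rw [hr]
            simp
      · rw [P, if_neg hc, P_cur rest [c]]
        rw [fA, if_neg hc]
        have hr := ih rest hrest
        cases hP : P rest [] with
        | nil => exact absurd hP (P_ne_nil rest [])
        | cons q qs =>
          rw [hP] at hr
          rw [hr]
          simp


-- ===== VERDICT (by name: the statement is the Claim_ definition above) =====
theorem format_code_inline_spec : Claim_equal_format_code_inline := by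
  intro text _
  unfold Spec_format_code_inline format_code_inline format_code_inline_alt
  have h0 : fci_go text.toList [] ((0 : Nat) : Int) = fA text.toList := by
    rw [fci_go_spec text.toList text.toList.length 0 [] (by omega)]
    simp
  rw [splitOn_eq_P]
  have hfa := fA_eq_P text.toList.length text.toList le_rfl
  cases hP : P text.toList [] with
  | nil => exact absurd hP (P_ne_nil text.toList [])
  | cons q qs =>
    rw [hP] at hfa
    simp only
    norm_num at h0
    rw [h0, hfa]
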